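-- pv_equiv track=rewrite | github.com/toli18/volley-platform | backend/app/services/bulgarian_training_generator.py | _token_set
-- ===== SOURCE A (Python) =====
-- from typing import Any, Dict, Iterable, List, Optional, Sequence, Set, Tuple
--
-- def _safe_str(value: Any) -> str:
--     return str(value).strip() if value is not None else ""
--
-- def _norm(value: Any) -> str:
--     return _safe_str(value).lower()
--
-- def _token_set(text: str) -> Set[str]:
--     out: Set[str] = set()
--     current = ""
--     for ch in _norm(text):
--         if ch.isalnum():
--             current += ch
--         elif len(current) > 2:
--             out.add(current)
--             current = ""
--         else:
--             current = ""
--     if len(current) > 2: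
--         out.add(current)
--     return out
-- ===== SOURCE B (Python) =====
-- def _groups(s):
--     # maximal runs of characters with equal isalnum() class, as (key, run) pairs
--     groups = []
--     i, n = 0, len(s)
--     while i < n:
--         k = s[i].isalnum()
--         j = i + 1
--         while j < n and s[j].isalnum() == k:
--             j += 1
--         groups.append((k, s[i:j]))
--         i = j
--     return groups
--
-- def _token_set(text):
--     norm = str(text).strip().lower()
--     return {g for k, g in _groups(norm) if k and len(g) > 2}
-- ===== Notes on version B (the rewrite author's own statement) =====
-- stated objective: alternative
-- what changed: Replaces A's character-by-character accumulator with flush-on-boundary branches by a run-splitter that slices the normalized string into maximal same-isalnum-class runs, then a set comprehension keeping alnum runs longer than 2.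
import Mathlib
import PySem

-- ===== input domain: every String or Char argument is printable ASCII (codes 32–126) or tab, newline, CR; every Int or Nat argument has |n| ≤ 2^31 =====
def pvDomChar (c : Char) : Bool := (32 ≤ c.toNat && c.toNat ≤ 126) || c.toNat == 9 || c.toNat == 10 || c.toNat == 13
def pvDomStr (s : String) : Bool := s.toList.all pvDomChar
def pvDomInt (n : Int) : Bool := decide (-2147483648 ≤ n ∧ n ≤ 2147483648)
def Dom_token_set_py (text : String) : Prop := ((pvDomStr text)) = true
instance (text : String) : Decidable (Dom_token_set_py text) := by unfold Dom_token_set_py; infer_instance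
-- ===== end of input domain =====

-- B replaces A's character-by-character accumulator/flush loop by a run-splitter
-- (maximal same-isalnum-class runs) plus a set comprehension; alternative decomposition, same cost.

-- ===== PORT A =====
-- finishA: the trailing `if len(current) > 2: out.add(current)` applied to the loop state
def finishA (st : PySem.Set String × List Char) : List String :=
  if 2 < st.2.length then PySem.Set.add st.1 (String.ofList st.2) else st.1

-- the for-loop of A over the characters, state = (out, current)
def loopA : List Char → PySem.Set String × List Char → PySem.Set String × List Char
  | [], st => st
  | ch :: cs, (out, cur) =>
    if PySem.Chars.isalnum ch then loopA cs (out, cur ++ [ch])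
    else if 2 < cur.length then loopA cs (PySem.Set.add out (String.ofList cur), [])
    else loopA cs (out, [])

def token_set_py (text : String) : List String :=
  finishA (loopA (PySem.Str.lower (PySem.Str.strip text)).toList (PySem.Set.empty, []))

-- ===== PORT B =====
-- B's _groups: maximal runs of equal isalnum class, as (key, run) pairs
def pyGroups : List Char → List (Bool × List Char)
  | [] => []
  | c :: cs =>
    (PySem.Chars.isalnum c,
      c :: cs.takeWhile (fun d => PySem.Chars.isalnum d == PySem.Chars.isalnum c)) ::
      pyGroups (cs.dropWhile (fun d => PySem.Chars.isalnum d == PySem.Chars.isalnum c))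
termination_by cs => cs.length
decreasing_by
  exact Nat.lt_succ_of_le (List.length_dropWhile_le _ _)

-- B's set comprehension over the groups
def token_set_py_alt (text : String) : List String :=
  PySem.Set.ofList
    ((pyGroups (PySem.Str.lower (PySem.Str.strip text)).toList).filterMap
      (fun kg => if kg.1 && 2 < kg.2.length then some (String.ofList kg.2) else none))

-- ===== PRECONDITION & SPEC =====
def Spec_token_set_py (text : String) (out : List String) : Prop := out = token_set_py_alt text
instance (text : String) (out : List String) : Decidable (Spec_token_set_py text out) := by unfold Spec_token_set_py; infer_instance

-- ===== CLAIM (what is proved, stated in full; the proofs are below) =====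
def Claim_equal_token_set_py : Prop := ∀ (text : String), Dom_token_set_py text → Spec_token_set_py text (token_set_py text)

-- ===== LEMMAS AND PROOFS =====

-- the token list B builds from a char list
def toks (cs : List Char) : List String :=
  (pyGroups cs).filterMap (fun kg => if kg.1 && 2 < kg.2.length then some (String.ofList kg.2) else none)

theorem toks_nil : toks [] = [] := by simp [toks, pyGroups]

theorem filterMap_if_head {α β : Type} (P : α → Bool) (g : α → β) (a : α) (l : List α) :
    (a :: l).filterMap (fun x => if P x then some (g x) else none) =
      (if P a then [g a] else []) ++ l.filterMap (fun x => if P x then some (g x) else none) := by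
  rw [List.filterMap_cons]
  by_cases h : P a = true
  · simp [h]
  · simp [h]

theorem toks_cons (c : Char) (cs : List Char) :
    toks (c :: cs) =
      (if PySem.Chars.isalnum c &&
          2 < (c :: cs.takeWhile (fun d => PySem.Chars.isalnum d == PySem.Chars.isalnum c)).length
        then [String.ofList (c :: cs.takeWhile (fun d => PySem.Chars.isalnum d == PySem.Chars.isalnum c))]
        else []) ++
      toks (cs.dropWhile (fun d => PySem.Chars.isalnum d == PySem.Chars.isalnum c)) := by
  simp only [toks]
  rw [pyGroups]
  exact filterMap_if_head (fun kg : Bool × List Char => kg.1 && 2 < kg.2.length) (fun kg => String.ofList kg.2) _ _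

theorem head_dropWhile {p : Char → Bool} :
    ∀ (l : List Char) (d : Char) (r : List Char), l.dropWhile p = d :: r → p d = false := by
  intro l
  induction l with
  | nil => intro d r h; simp [List.dropWhile] at h
  | cons a l ih =>
    intro d r h
    by_cases ha : p a = true
    · rw [List.dropWhile_cons_of_pos ha] at h; exact ih d r h
    · rw [List.dropWhile_cons_of_neg ha] at h
      cases h; simpa using ha

-- skipping a non-alnum char does not change B's tokens
theorem toks_nonal (d : Char) (r : List Char) (hd : PySem.Chars.isalnum d = false) :
    toks (d :: r) = toks r := by
  rw [toks_cons, hd]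
  simp only [Bool.false_and, Bool.false_eq_true, if_false, List.nil_append]
  cases r with
  | nil => simp
  | cons e r' =>
    by_cases he : PySem.Chars.isalnum e = true
    · rw [List.dropWhile_cons_of_neg (by simp [he])]
    · have he' : PySem.Chars.isalnum e = false := Bool.eq_false_iff.mpr he
      rw [List.dropWhile_cons_of_pos (by simp [he'])]
      rw [toks_cons, he']
      simp only [Bool.false_and, Bool.false_eq_true, if_false, List.nil_append]

-- A's loop absorbs a maximal alnum prefix into `current`
theorem loopA_alnum_prefix :
    ∀ (cs : List Char) (out : PySem.Set String) (cur : List Char),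
      loopA cs (out, cur) =
        loopA (cs.dropWhile PySem.Chars.isalnum) (out, cur ++ cs.takeWhile PySem.Chars.isalnum) := by
  intro cs
  induction cs with
  | nil => intro out cur; simp [List.takeWhile, List.dropWhile]
  | cons c cs ih =>
    intro out cur
    by_cases hc : PySem.Chars.isalnum c = true
    · rw [List.dropWhile_cons_of_pos hc, List.takeWhile_cons_of_pos hc]
      show loopA (c :: cs) (out, cur) = _
      rw [loopA]
      simp only [hc, if_true]
      rw [ih]
      simp
    · rw [List.dropWhile_cons_of_neg (by simp [hc]), List.takeWhile_cons_of_neg (by simp [hc])]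
      simp

-- main invariant: A's flushed loop from an empty accumulator folds B's tokens into out
theorem loopA_toks :
    ∀ (n : Nat) (cs : List Char), cs.length ≤ n → ∀ (out : PySem.Set String),
      finishA (loopA cs (out, [])) = (toks cs).foldl PySem.Set.add out := by
  intro n
  induction n with
  | zero =>
    intro cs hlen out
    have : cs = [] := List.eq_nil_of_length_eq_zero (Nat.le_zero.mp hlen)
    subst this
    simp [loopA, finishA, toks_nil]
  | succ n ih =>
    intro cs hlen out
    cases cs with
    | nil => simp [loopA, finishA, toks_nil]
    | cons c cs' =>
      have hlen' : cs'.length ≤ n := by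
        simp only [List.length_cons] at hlen; omega
      by_cases hc : PySem.Chars.isalnum c = true
      · -- the leading group is alnum
        have hp : (fun d => PySem.Chars.isalnum d == true) = PySem.Chars.isalnum := by
          funext d; cases PySem.Chars.isalnum d <;> rfl
        have habs := loopA_alnum_prefix (c :: cs') out []
        rw [List.takeWhile_cons_of_pos hc, List.dropWhile_cons_of_pos hc, List.nil_append] at habs
        rw [toks_cons, hc, hp]
        simp only [Bool.true_and]
        set t := c :: cs'.takeWhile PySem.Chars.isalnum with ht
        cases hr : cs'.dropWhile PySem.Chars.isalnum with
        | nil =>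
          rw [habs, hr]
          rw [toks_nil, List.append_nil]
          show finishA (out, t) = _
          by_cases hl : 2 < t.length
          · simp [finishA, hl]
          · simp [finishA, hl]
        | cons d r' =>
          have hd : PySem.Chars.isalnum d = false := head_dropWhile cs' d r' hr
          rw [habs, hr]
          show finishA (loopA (d :: r') (out, t)) = _
          rw [loopA]
          simp only [hd, Bool.false_eq_true, if_false]
          have hr'len : r'.length ≤ n := by
            have h1 : (cs'.dropWhile PySem.Chars.isalnum).length ≤ cs'.length :=
              List.length_dropWhile_le _ _
            rw [hr] at h1
            simp only [List.length_cons] at h1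
            omega
          by_cases hl : 2 < t.length
          · simp only [hl, if_true, List.singleton_append, decide_true]
            rw [ih r' hr'len (PySem.Set.add out (String.ofList t)), toks_nonal d r' hd]
            simp [List.foldl_cons]
          · simp only [hl, if_false, decide_false]
            rw [ih r' hr'len out, toks_nonal d r' hd]
            simp
      · -- the leading char is non-alnum: A flushes the empty accumulator, B filters the group out
        have hc' : PySem.Chars.isalnum c = false := Bool.eq_false_iff.mpr hc
        rw [toks_nonal c cs' hc']
        show finishA (loopA (c :: cs') (out, [])) = _
        rw [loopA]
        simp only [hc', Bool.false_eq_true, if_false, List.length_nil]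
        have h2 : ¬ (2 < 0) := by omega
        simp only [h2, if_false]
        exact ih cs' hlen' out

-- ===== VERDICT (by name: the statement is the Claim_ definition above) =====
theorem token_set_py_spec : Claim_equal_token_set_py := by
  intro text _
  unfold Spec_token_set_py token_set_py token_set_py_alt
  rw [loopA_toks (PySem.Str.lower (PySem.Str.strip text)).toList.length _ (le_refl _)]
  rw [PySem.Set.ofList_eq_foldl]
  rfl
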